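-- pv_equiv track=rewrite | github.com/ridhijain709/student-ai-automation | app/clients.py | clinic_flow
-- ===== SOURCE A (Python) =====
-- def _norm(message: str) -> str:
--     return (message or "").strip().lower()
--
-- def clinic_flow(message: str, client_name: str = "TANUS Clinic") -> tuple[str, str]:
--     m = _norm(message)
--     if any(k in m for k in ["book", "appointment", "slot", "consult", "consultation"]):
--         return (
--             f"{client_name}: Perfect—happy to help you book a consultation. "
--             "Do you prefer online or in-clinic, and what time works best (today/tomorrow)?",
--             "clinic_booking",
--         )
--     if any(k in m for k in ["price", "fees", "cost", "charges"]):
--         return (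
--             f"{client_name}: Pricing depends on severity and the plan after assessment. "
--             "What’s your main concern (acne/hair fall/skin) and since when? "
--             "Would you like to book a consultation slot today or tomorrow?",
--             "clinic_pricing",
--         )
--     if any(k in m for k in ["acne", "pimple"]):
--         return (
--             f"{client_name}: Yes—acne can be treated effectively with a personalized plan. "
--             "Since when are you facing it, and is it mild or painful/cystic? "
--             "Would you like to book a consultation (online or in-clinic)?",
--             "clinic_acne",
--         )
--     if any(k in m for k in ["hair", "hairfall", "hair fall", "dandruff"]):
--         return (
--             f"{client_name}: For hair fall, we first check common triggers (stress, nutrition, hormones, scalp). "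
--             "Since when is the hair fall happening? "
--             "Shall I book a consultation slot for you?",
--             "clinic_hair",
--         )
--     if any(k in m for k in ["skin", "pigmentation", "rash", "eczema"]):
--         return (
--             f"{client_name}: Got it—skin concerns are best handled after a quick assessment. "
--             "Can you share what the issue is and since when? "
--             "Would you like to book an appointment today or tomorrow?",
--             "clinic_skin",
--         )
--     return (
--         f"{client_name}: Hi! Tell me what you need help with—acne, hair fall, skin, or pricing. "
--         "Do you prefer an online consultation or in-clinic visit?",
--         "clinic_general",
--     )
-- ===== SOURCE B (Python) =====
-- # Flat (keyword, priority) scan computing the minimum matched priority, then one table lookup.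
-- _KEYWORDS = [
--     ("book", 0), ("appointment", 0), ("slot", 0), ("consult", 0), ("consultation", 0),
--     ("price", 1), ("fees", 1), ("cost", 1), ("charges", 1),
--     ("acne", 2), ("pimple", 2),
--     ("hair", 3), ("hairfall", 3), ("hair fall", 3), ("dandruff", 3),
--     ("skin", 4), ("pigmentation", 4), ("rash", 4), ("eczema", 4),
-- ]
--
-- _REPLIES = [
--     ("Perfect—happy to help you book a consultation. "
--      "Do you prefer online or in-clinic, and what time works best (today/tomorrow)?",
--      "clinic_booking"),
--     ("Pricing depends on severity and the plan after assessment. "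
--      "What’s your main concern (acne/hair fall/skin) and since when? "
--      "Would you like to book a consultation slot today or tomorrow?",
--      "clinic_pricing"),
--     ("Yes—acne can be treated effectively with a personalized plan. "
--      "Since when are you facing it, and is it mild or painful/cystic? "
--      "Would you like to book a consultation (online or in-clinic)?",
--      "clinic_acne"),
--     ("For hair fall, we first check common triggers (stress, nutrition, hormones, scalp). "
--      "Since when is the hair fall happening? "
--      "Shall I book a consultation slot for you?",
--      "clinic_hair"),
--     ("Got it—skin concerns are best handled after a quick assessment. "
--      "Can you share what the issue is and since when? "
--      "Would you like to book an appointment today or tomorrow?",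
--      "clinic_skin"),
--     ("Hi! Tell me what you need help with—acne, hair fall, skin, or pricing. "
--      "Do you prefer an online consultation or in-clinic visit?",
--      "clinic_general"),
-- ]
--
--
-- def clinic_flow(message: str, client_name: str = "TANUS Clinic") -> tuple[str, str]:
--     m = (message or "").strip().lower()
--     best = 5  # index of the general fallback
--     for k, p in _KEYWORDS:
--         if k in m:
--             best = min(best, p)
--     reply, tag = _REPLIES[best]
--     return (client_name + ": " + reply, tag)
-- ===== Notes on version B (the rewrite author's own statement) =====
-- stated objective: alternative
-- what changed: Instead of A's ordered early-return if-cascade, B does one flat fold over all (keyword, priority) pairs computing the minimum matched priority with an accumulator, then a single indexed table lookup for the reply.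
import Mathlib
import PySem

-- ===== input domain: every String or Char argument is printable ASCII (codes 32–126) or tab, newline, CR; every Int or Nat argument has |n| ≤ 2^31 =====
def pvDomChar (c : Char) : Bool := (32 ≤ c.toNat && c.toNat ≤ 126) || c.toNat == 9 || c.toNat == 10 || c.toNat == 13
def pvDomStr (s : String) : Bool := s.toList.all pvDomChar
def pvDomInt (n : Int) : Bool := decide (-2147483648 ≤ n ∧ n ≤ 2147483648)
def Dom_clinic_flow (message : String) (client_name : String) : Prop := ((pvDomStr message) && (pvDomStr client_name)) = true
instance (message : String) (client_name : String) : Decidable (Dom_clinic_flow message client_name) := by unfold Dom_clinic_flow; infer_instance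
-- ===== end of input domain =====

-- B replaces A's ordered early-return if-cascade by one flat fold over (keyword, priority)
-- pairs computing the minimum matched priority, then a single table lookup (alternative, not faster).
-- ===== PORT A =====
-- (message or "").strip().lower()
def clinic_norm (message : String) : String :=
  PySem.Str.lower (PySem.Str.strip (if message = "" then "" else message))

def clinic_flow (message : String) (client_name : String) : String × String :=
  let m := clinic_norm message
  if ["book", "appointment", "slot", "consult", "consultation"].any (fun k => PySem.Str.isIn k m) then
    (client_name ++ ": Perfect—happy to help you book a consultation. " ++
      "Do you prefer online or in-clinic, and what time works best (today/tomorrow)?",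
     "clinic_booking")
  else if ["price", "fees", "cost", "charges"].any (fun k => PySem.Str.isIn k m) then
    (client_name ++ ": Pricing depends on severity and the plan after assessment. " ++
      "What’s your main concern (acne/hair fall/skin) and since when? " ++
      "Would you like to book a consultation slot today or tomorrow?",
     "clinic_pricing")
  else if ["acne", "pimple"].any (fun k => PySem.Str.isIn k m) then
    (client_name ++ ": Yes—acne can be treated effectively with a personalized plan. " ++
      "Since when are you facing it, and is it mild or painful/cystic? " ++
      "Would you like to book a consultation (online or in-clinic)?",
     "clinic_acne")
  else if ["hair", "hairfall", "hair fall", "dandruff"].any (fun k => PySem.Str.isIn k m) then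
    (client_name ++ ": For hair fall, we first check common triggers (stress, nutrition, hormones, scalp). " ++
      "Since when is the hair fall happening? " ++
      "Shall I book a consultation slot for you?",
     "clinic_hair")
  else if ["skin", "pigmentation", "rash", "eczema"].any (fun k => PySem.Str.isIn k m) then
    (client_name ++ ": Got it—skin concerns are best handled after a quick assessment. " ++
      "Can you share what the issue is and since when? " ++
      "Would you like to book an appointment today or tomorrow?",
     "clinic_skin")
  else
    (client_name ++ ": Hi! Tell me what you need help with—acne, hair fall, skin, or pricing. " ++
      "Do you prefer an online consultation or in-clinic visit?",
     "clinic_general")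

-- ===== PORT B =====
-- the flat (keyword, priority) list of Source B (_KEYWORDS)
def clinicKeywords : List (String × Nat) :=
  [("book", 0), ("appointment", 0), ("slot", 0), ("consult", 0), ("consultation", 0),
   ("price", 1), ("fees", 1), ("cost", 1), ("charges", 1),
   ("acne", 2), ("pimple", 2),
   ("hair", 3), ("hairfall", 3), ("hair fall", 3), ("dandruff", 3),
   ("skin", 4), ("pigmentation", 4), ("rash", 4), ("eczema", 4)]

-- the reply table of Source B (_REPLIES)
def clinicReplies : List (String × String) :=
  [("Perfect—happy to help you book a consultation. Do you prefer online or in-clinic, and what time works best (today/tomorrow)?",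
    "clinic_booking"),
   ("Pricing depends on severity and the plan after assessment. What’s your main concern (acne/hair fall/skin) and since when? Would you like to book a consultation slot today or tomorrow?",
    "clinic_pricing"),
   ("Yes—acne can be treated effectively with a personalized plan. Since when are you facing it, and is it mild or painful/cystic? Would you like to book a consultation (online or in-clinic)?",
    "clinic_acne"),
   ("For hair fall, we first check common triggers (stress, nutrition, hormones, scalp). Since when is the hair fall happening? Shall I book a consultation slot for you?",
    "clinic_hair"),
   ("Got it—skin concerns are best handled after a quick assessment. Can you share what the issue is and since when? Would you like to book an appointment today or tomorrow?",
    "clinic_skin"),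
   ("Hi! Tell me what you need help with—acne, hair fall, skin, or pricing. Do you prefer an online consultation or in-clinic visit?",
    "clinic_general")]

def clinic_flow_alt (message : String) (client_name : String) : String × String :=
  let m := PySem.Str.lower (PySem.Str.strip (if message = "" then "" else message))
  -- the 'for k, p in _KEYWORDS' loop of Source B, accumulator 'best' starting at 5
  let best := clinicKeywords.foldl (fun best kp => if PySem.Str.isIn kp.1 m then min best kp.2 else best) 5
  -- _REPLIES[best]; best ≤ 5 always, so the index is in range and the default is never used
  let rt := clinicReplies.getD best ("", "")
  (client_name ++ ": " ++ rt.1, rt.2)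

-- ===== PRECONDITION & SPEC =====
def Spec_clinic_flow (message : String) (client_name : String) (out : String × String) : Prop := out = clinic_flow_alt message client_name
instance (message : String) (client_name : String) (out : String × String) : Decidable (Spec_clinic_flow message client_name out) := by unfold Spec_clinic_flow; infer_instance

-- ===== CLAIM =====
def Claim_equal_clinic_flow : Prop := ∀ (message : String) (client_name : String), Dom_clinic_flow message client_name → Spec_clinic_flow message client_name (clinic_flow message client_name)

-- ===== LEMMAS AND PROOFS =====
-- folding min over a constant-priority keyword group = one 'any' test
lemma foldl_min_const (m : String) (ks : List String) (p b : Nat) :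
    (ks.map (fun k => (k, p))).foldl (fun best kp => if PySem.Str.isIn kp.1 m then min best kp.2 else best) b
      = if ks.any (fun k => PySem.Str.isIn k m) then min b p else b := by
  induction ks generalizing b with
  | nil => simp
  | cons k ks ih =>
    simp only [List.map_cons, List.foldl_cons, List.any_cons]
    by_cases h : PySem.Str.isIn k m = true
    · rw [if_pos h, ih]
      simp only [h, Bool.true_or, if_true]
      split_ifs <;> omega
    · rw [if_neg h, ih]
      have h' : PySem.Str.isIn k m = false := by simpa using h
      simp only [h', Bool.false_or]

-- the whole body equivalence, for an arbitrary normalized string m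
set_option maxRecDepth 40000 in
set_option maxHeartbeats 2000000 in
lemma clinic_main (m cn : String) :
    (if ["book", "appointment", "slot", "consult", "consultation"].any (fun k => PySem.Str.isIn k m) then
      (cn ++ ": Perfect—happy to help you book a consultation. " ++
        "Do you prefer online or in-clinic, and what time works best (today/tomorrow)?",
       "clinic_booking")
    else if ["price", "fees", "cost", "charges"].any (fun k => PySem.Str.isIn k m) then
      (cn ++ ": Pricing depends on severity and the plan after assessment. " ++
        "What’s your main concern (acne/hair fall/skin) and since when? " ++
        "Would you like to book a consultation slot today or tomorrow?",
       "clinic_pricing")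
    else if ["acne", "pimple"].any (fun k => PySem.Str.isIn k m) then
      (cn ++ ": Yes—acne can be treated effectively with a personalized plan. " ++
        "Since when are you facing it, and is it mild or painful/cystic? " ++
        "Would you like to book a consultation (online or in-clinic)?",
       "clinic_acne")
    else if ["hair", "hairfall", "hair fall", "dandruff"].any (fun k => PySem.Str.isIn k m) then
      (cn ++ ": For hair fall, we first check common triggers (stress, nutrition, hormones, scalp). " ++
        "Since when is the hair fall happening? " ++
        "Shall I book a consultation slot for you?",
       "clinic_hair")
    else if ["skin", "pigmentation", "rash", "eczema"].any (fun k => PySem.Str.isIn k m) then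
      (cn ++ ": Got it—skin concerns are best handled after a quick assessment. " ++
        "Can you share what the issue is and since when? " ++
        "Would you like to book an appointment today or tomorrow?",
       "clinic_skin")
    else
      (cn ++ ": Hi! Tell me what you need help with—acne, hair fall, skin, or pricing. " ++
        "Do you prefer an online consultation or in-clinic visit?",
       "clinic_general"))
    = (let best := clinicKeywords.foldl (fun best kp => if PySem.Str.isIn kp.1 m then min best kp.2 else best) 5
       let rt := clinicReplies.getD best ("", "")
       (cn ++ ": " ++ rt.1, rt.2)) := by
  show _ = (let best := clinicKeywords.foldl (fun best kp => if PySem.Str.isIn kp.1 m then min best kp.2 else best) 5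
            let rt := clinicReplies.getD best ("", "")
            (cn ++ ": " ++ rt.1, rt.2))
  rw [show clinicKeywords =
      (["book", "appointment", "slot", "consult", "consultation"].map (fun k => (k, 0))) ++
      (["price", "fees", "cost", "charges"].map (fun k => (k, 1))) ++
      (["acne", "pimple"].map (fun k => (k, 2))) ++
      (["hair", "hairfall", "hair fall", "dandruff"].map (fun k => (k, 3))) ++
      (["skin", "pigmentation", "rash", "eczema"].map (fun k => (k, 4))) from rfl]
  simp only [List.foldl_append, foldl_min_const]
  split_ifs <;> simp only [String.append_assoc] <;> rfl

-- ===== VERDICT =====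
theorem clinic_flow_spec : Claim_equal_clinic_flow := by
  intro message client_name _
  unfold Spec_clinic_flow clinic_flow clinic_flow_alt clinic_norm
  exact clinic_main (PySem.Str.lower (PySem.Str.strip (if message = "" then "" else message))) client_name
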